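-- pv_equiv track=rewrite | github.com/magnet5258/Algorithm | 프로그래머스/1/82612. 부족한 금액 계산하기/부족한 금액 계산하기.py | solution
-- ===== SOURCE A (Python) =====
-- def solution(price, money, count):
--     price_sum = 0
--
--     for i in range(1, count + 1):
--         price_sum += price * i
--
--     if money > price_sum:
--         return 0
--     else:
--         return abs(money - price_sum)
-- ===== SOURCE B (Python) =====
-- def solution(price, money, count):
--     total = price * count * (count + 1) // 2 if count > 0 else 0
--     return max(0, total - money)
-- ===== Notes on version B (the rewrite author's own statement) =====
-- stated objective: faster
-- what changed: Replaced the O(count) accumulation loop by the arithmetic-series closed form price*count*(count+1)//2 and the branch-plus-abs by max(0, total - money).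
import Mathlib
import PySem

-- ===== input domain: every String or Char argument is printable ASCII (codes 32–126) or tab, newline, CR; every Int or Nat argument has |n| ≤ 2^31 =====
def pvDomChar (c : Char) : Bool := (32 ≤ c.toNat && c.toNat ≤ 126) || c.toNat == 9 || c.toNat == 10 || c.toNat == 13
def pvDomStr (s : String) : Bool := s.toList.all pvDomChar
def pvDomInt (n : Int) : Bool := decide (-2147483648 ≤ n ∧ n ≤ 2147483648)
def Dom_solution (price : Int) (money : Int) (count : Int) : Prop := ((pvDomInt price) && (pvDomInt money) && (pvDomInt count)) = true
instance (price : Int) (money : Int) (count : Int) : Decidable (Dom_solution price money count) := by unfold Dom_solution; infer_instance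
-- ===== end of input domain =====

-- B replaces A's O(count) summation loop by the closed-form triangular number, and the
-- branch-plus-abs by max 0 (total - money); objective: faster (asymptotic, O(1) vs O(count)).

-- ===== PORT A =====
def solution (price : Int) (money : Int) (count : Int) : Int :=
  let price_sum := (PySem.List.pyRange 1 (count + 1) 1).foldl (fun s i => s + price * i) 0
  if money > price_sum then 0 else |money - price_sum|

-- ===== PORT B =====
def solution_alt (price : Int) (money : Int) (count : Int) : Int :=
  let total := if count > 0 then PySem.Int.floordiv (price * count * (count + 1)) 2 else 0
  max 0 (total - money)

-- ===== PRECONDITION & SPEC =====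
def Spec_solution (price : Int) (money : Int) (count : Int) (out : Int) : Prop := out = solution_alt price money count
instance (price : Int) (money : Int) (count : Int) (out : Int) : Decidable (Spec_solution price money count out) := by unfold Spec_solution; infer_instance

-- ===== CLAIM (what is proved, stated in full; the proofs are below) =====
def Claim_equal_solution : Prop := ∀ (price : Int) (money : Int) (count : Int), Dom_solution price money count → Spec_solution price money count (solution price money count)

-- ===== LEMMAS AND PROOFS =====

-- triangular numbers, defined by recursion to follow the loop
def pvTri : Nat → Nat
  | 0 => 0
  | n + 1 => pvTri n + (n + 1)

theorem pvTri_double (n : Nat) : 2 * pvTri n = n * (n + 1) := by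
  induction n with
  | zero => rfl
  | succ n ih => simp only [pvTri, Nat.mul_add, ih]; ring

theorem loop_sum (price : Int) (n : Nat) :
    (PySem.List.pyRange 1 ((n : Int) + 1) 1).foldl (fun s i => s + price * i) 0
      = price * (pvTri n : Int) := by
  induction n with
  | zero => simp [PySem.List.pyRange_one_eq_nil, pvTri]
  | succ n ih =>
      push_cast
      rw [PySem.List.pyRange_one_succ_right (by omega :(1:Int) ≤ (n : Int) + 1)]
      rw [List.foldl_append, ih]
      simp only [List.foldl, pvTri]
      push_cast
      ring

theorem closed_form (price : Int) (n : Nat) :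
    PySem.Int.floordiv (price * (n : Int) * ((n : Int) + 1)) 2 = price * (pvTri n : Int) := by
  have h2 : price * (n : Int) * ((n : Int) + 1) = 2 * (price * (pvTri n : Int)) := by
    have hz : (2 : Int) * (pvTri n : Int) = (n : Int) * ((n : Int) + 1) := by
      exact_mod_cast pvTri_double n
    rw [show price * (n : Int) * ((n : Int) + 1) = price * ((n : Int) * ((n : Int) + 1)) from by ring, ← hz]
    ring
  rw [h2, PySem.Int.floordiv_eq_ediv_of_pos (by norm_num)]
  exact Int.mul_ediv_cancel_left _ (by norm_num)

-- ===== VERDICT (by name: the statement is the Claim_ definition above) =====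
theorem solution_spec : Claim_equal_solution := by
  intro price money count _
  unfold Spec_solution solution solution_alt
  by_cases hc : count > 0
  · obtain ⟨n, rfl⟩ : ∃ n : Nat, count = (n : Int) := ⟨count.toNat, by omega⟩
    simp only [if_pos hc]
    rw [loop_sum, closed_form]
    set S := price * (pvTri n : Int) with hS
    by_cases hm : money > S
    · simp [if_pos hm]; omega
    · rw [if_neg hm, abs_of_nonpos (by omega)]; omega
  · have hnil : PySem.List.pyRange 1 (count + 1) 1 = [] :=
      PySem.List.pyRange_one_eq_nil (by omega)
    simp only [hnil, List.foldl_nil, if_neg hc]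
    by_cases hm : money > 0
    · simp [if_pos hm]; omega
    · rw [if_neg hm, abs_of_nonpos (by omega)]; omega
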